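-- pv_equiv track=rewrite | github.com/ohjay/ohjay.github.io | cs61a/fa16/quiz/quiz1.py | cook
-- ===== SOURCE A (Python) =====
-- def cook(pancake, time_left):
--     def cook():
--         if not time_left:
--             return "golden-brown pancake"
--         if -time_left > 0:
--             return "burnt pancake"
--         return "still batter" # than cereal
--
--     while time_left > 0:
--         time_left -= 2
--         pancake = cook()
--     return pancake
-- ===== SOURCE B (Python) =====
-- def cook(pancake, time_left):
--     if time_left <= 0:
--         return pancake
--     return "golden-brown pancake" if time_left % 2 == 0 else "burnt pancake"
-- ===== Notes on version B (the rewrite author's own statement) =====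
-- stated objective: simpler
-- what changed: Replaces the decrement-by-2 countdown loop (with an inner closure re-read each iteration) by a direct parity test on time_left: positive even yields golden-brown, positive odd yields burnt, non-positive returns pancake unchanged.
import Mathlib
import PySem

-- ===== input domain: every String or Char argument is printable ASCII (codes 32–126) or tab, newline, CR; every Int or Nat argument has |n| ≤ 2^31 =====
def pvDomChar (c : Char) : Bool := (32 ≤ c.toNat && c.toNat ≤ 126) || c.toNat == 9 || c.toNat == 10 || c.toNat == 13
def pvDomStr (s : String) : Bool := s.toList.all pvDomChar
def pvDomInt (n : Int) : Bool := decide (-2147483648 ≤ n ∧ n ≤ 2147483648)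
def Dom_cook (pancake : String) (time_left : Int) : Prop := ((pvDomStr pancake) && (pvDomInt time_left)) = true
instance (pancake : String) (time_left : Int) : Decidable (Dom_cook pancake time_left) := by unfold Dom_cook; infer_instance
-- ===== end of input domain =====

-- B replaces A's decrement-by-2 countdown loop with a direct parity test (simpler, O(1)).
-- ===== PORT A =====
-- the inner closure `cook()` of A, reading the current time_left
def cookInner (time_left : Int) : String :=
  if time_left = 0 then "golden-brown pancake"
  else if -time_left > 0 then "burnt pancake"
  else "still batter"

-- the `while time_left > 0` loop of A
def cookLoop (pancake : String) (time_left : Int) : String :=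
  if h : time_left > 0 then
    cookLoop (cookInner (time_left - 2)) (time_left - 2)
  else pancake
termination_by time_left.toNat
decreasing_by omega

def cook (pancake : String) (time_left : Int) : String := cookLoop pancake time_left

-- ===== PORT B =====
def cook_alt (pancake : String) (time_left : Int) : String :=
  if time_left ≤ 0 then pancake
  else if PySem.Int.mod time_left 2 = 0 then "golden-brown pancake"
  else "burnt pancake"

-- ===== PRECONDITION & SPEC =====
def Spec_cook (pancake : String) (time_left : Int) (out : String) : Prop := out = cook_alt pancake time_left
instance (pancake : String) (time_left : Int) (out : String) : Decidable (Spec_cook pancake time_left out) := by unfold Spec_cook; infer_instance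

-- ===== CLAIM (what is proved, stated in full; the proofs are below) =====
def Claim_equal_cook : Prop := ∀ (pancake : String) (time_left : Int), Dom_cook pancake time_left → Spec_cook pancake time_left (cook pancake time_left)

-- ===== LEMMAS AND PROOFS =====

lemma cookLoop_closed (time_left : Int) : ∀ pancake : String,
    cookLoop pancake time_left =
      if time_left ≤ 0 then pancake
      else if time_left % 2 = 0 then "golden-brown pancake" else "burnt pancake" := by
  induction hn : time_left.toNat using Nat.strong_induction_on generalizing time_left with
  | _ n ih =>
    intro pancake
    rw [cookLoop]
    by_cases h : time_left > 0
    · simp only [h, dif_pos]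
      rw [ih (time_left - 2).toNat (by omega) _ rfl]
      by_cases h2 : time_left - 2 ≤ 0
      · simp only [h2, if_pos]
        unfold cookInner
        rcases (by omega : time_left = 1 ∨ time_left = 2) with rfl | rfl <;> norm_num
      · have he : (time_left - 2) % 2 = time_left % 2 := by omega
        simp [h2, he]
        exact fun h0 => absurd h0 (by omega)
    · simp [h, (by omega : time_left ≤ 0)]

-- ===== VERDICT (by name: the statement is the Claim_ definition above) =====
theorem cook_spec : Claim_equal_cook := by
  intro pancake time_left _
  unfold Spec_cook cook cook_alt
  rw [cookLoop_closed]
  by_cases h : time_left ≤ 0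
  · simp [h]
  · simp only [h, if_false]
    rw [PySem.Int.mod_eq_emod_of_pos (by omega)]
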